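-- pv_equiv track=rewrite | github.com/pypi-data/pypi-mirror-293 | packages/pywhitakers/pywhitakers-0.0.7.tar.gz/pywhitakers-0.0.7/pywhitakers/__init__.py | latin_comparison
-- ===== SOURCE A (Python) =====
-- def latin_comparison(word1,word2):
--     if len(word1) != len(word2):
--         return False
--     if word1==word2:
--         return True
--     for i in range(len(word1)):
--         if word1[i] == word2[i]:
--             continue
--         elif word1[i] == "i" and word2[i] == "j":
--             continue
--         elif word2[i] == "i" and word1[i] == "j":
--             continue
--         elif word1[i] == "u" and word2[i] == "v":
--             continue
--         elif word2[i] == "u" and word1[i] == "v":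
--             continue
--         else:
--             return False
--     return True
-- ===== SOURCE B (Python) =====
-- _NORM = str.maketrans("jv", "iu")
--
-- def latin_comparison(word1, word2):
--     return word1.translate(_NORM) == word2.translate(_NORM)
-- ===== Notes on version B (the rewrite author's own statement) =====
-- stated objective: simpler
-- what changed: Replaces the indexed loop with its five-way branch cascade by normalizing both words (j->i, v->u) with str.translate and comparing the canonical forms with a single string equality.
import Mathlib
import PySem

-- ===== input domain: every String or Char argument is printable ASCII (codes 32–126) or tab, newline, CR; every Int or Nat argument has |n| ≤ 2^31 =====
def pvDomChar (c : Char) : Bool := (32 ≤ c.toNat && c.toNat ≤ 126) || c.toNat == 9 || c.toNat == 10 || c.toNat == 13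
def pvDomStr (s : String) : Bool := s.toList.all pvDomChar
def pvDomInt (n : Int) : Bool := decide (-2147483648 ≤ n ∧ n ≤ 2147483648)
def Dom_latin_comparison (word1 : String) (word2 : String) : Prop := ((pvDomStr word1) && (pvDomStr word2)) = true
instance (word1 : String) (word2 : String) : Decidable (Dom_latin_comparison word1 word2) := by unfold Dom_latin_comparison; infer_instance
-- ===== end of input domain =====

-- B replaces A's per-index branch cascade by normalizing both words (j->i, v->u) and comparing the canonical forms once: simpler, same O(n) cost.


-- ===== PORT A =====
-- A's per-index loop, as structural recursion over the two char lists (branches in A's order)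
def lcLoop : List Char → List Char → Bool
  | [], [] => true
  | c1 :: r1, c2 :: r2 =>
    if c1 = c2 then lcLoop r1 r2
    else if c1 = 'i' ∧ c2 = 'j' then lcLoop r1 r2
    else if c2 = 'i' ∧ c1 = 'j' then lcLoop r1 r2
    else if c1 = 'u' ∧ c2 = 'v' then lcLoop r1 r2
    else if c2 = 'u' ∧ c1 = 'v' then lcLoop r1 r2
    else false
  | _, _ => false

def latin_comparison (word1 : String) (word2 : String) : Bool :=
  if word1.toList.length ≠ word2.toList.length then false
  else if word1 = word2 then true
  else lcLoop word1.toList word2.toList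

-- ===== PORT B =====
-- B: normalize each character (j->i, v->u) and compare the canonical forms
def normChar (c : Char) : Char := if c = 'j' then 'i' else if c = 'v' then 'u' else c

def latin_comparison_alt (word1 : String) (word2 : String) : Bool :=
  word1.toList.map normChar = word2.toList.map normChar

-- ===== PRECONDITION & SPEC =====
def Spec_latin_comparison (word1 : String) (word2 : String) (out : Bool) : Prop := out = latin_comparison_alt word1 word2
instance (word1 : String) (word2 : String) (out : Bool) : Decidable (Spec_latin_comparison word1 word2 out) := by unfold Spec_latin_comparison; infer_instance

-- ===== CLAIM (what is proved, stated in full; the proofs are below) =====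
def Claim_equal_latin_comparison : Prop := ∀ (word1 : String) (word2 : String), Dom_latin_comparison word1 word2 → Spec_latin_comparison word1 word2 (latin_comparison word1 word2)

-- ===== LEMMAS AND PROOFS =====

-- ===== VERDICT (by name: the statement is the Claim_ definition above) =====
lemma lcLoop_eq_map (l1 : List Char) : ∀ l2 : List Char,
    lcLoop l1 l2 = (l1.map normChar = l2.map normChar : Bool) := by
  induction l1 with
  | nil => intro l2; cases l2 <;> simp [lcLoop]
  | cons c1 r1 ih =>
    intro l2
    cases l2 with
    | nil => simp [lcLoop]
    | cons c2 r2 =>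
      simp only [lcLoop, List.map]
      have hc : (if c1 = c2 then lcLoop r1 r2
          else if c1 = 'i' ∧ c2 = 'j' then lcLoop r1 r2
          else if c2 = 'i' ∧ c1 = 'j' then lcLoop r1 r2
          else if c1 = 'u' ∧ c2 = 'v' then lcLoop r1 r2
          else if c2 = 'u' ∧ c1 = 'v' then lcLoop r1 r2
          else false)
          = (if normChar c1 = normChar c2 then lcLoop r1 r2 else false) := by
        unfold normChar
        split_ifs <;> simp_all [eq_comm]
      rw [hc, ih r2]
      by_cases h : normChar c1 = normChar c2 <;> simp [h]

theorem latin_comparison_spec : Claim_equal_latin_comparison := by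
  intro w1 w2 _
  unfold Spec_latin_comparison latin_comparison latin_comparison_alt
  rw [lcLoop_eq_map]
  by_cases hl : w1.toList.length = w2.toList.length
  · by_cases he : w1 = w2 <;> simp [hl, he]
  · have hne : w1.toList.map normChar ≠ w2.toList.map normChar := by
      intro h; exact hl (by simpa using congrArg List.length h)
    rw [if_pos hl]
    simp [hne]
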